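-- pv_equiv track=rewrite | github.com/ad-freiburg/tokenization-repair | scripts/acl_cleaned_get_ocr_errors.py | unite_matched_spans
-- ===== SOURCE A (Python) =====
-- from typing import List, Tuple
--
-- def unite_matched_spans(matching: List[Tuple[int, int]]) -> List[Tuple[Tuple[int, int], Tuple[int, int]]]:
--     spans = []
--     if len(matching) == 0:
--         return spans
--     span_start = matching[0]
--     span_end = matching[0]
--     for i, j in matching[1:]:
--         if i == span_end[0] + 1 and j == span_end[1] + 1:
--             span_end = i, j
--         else:
--             spans.append(((span_start[0], span_end[0]), (span_start[1], span_end[1])))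
--             span_start = i, j
--             span_end = i, j
--     spans.append(((span_start[0], span_end[0]), (span_start[1], span_end[1])))
--     return spans
-- ===== SOURCE B (Python) =====
-- from typing import List, Tuple
--
-- def unite_matched_spans(matching: List[Tuple[int, int]]) -> List[Tuple[Tuple[int, int], Tuple[int, int]]]:
--     # Boundary-index algorithm: compute the break positions first, then read spans off by index.
--     n = len(matching)
--     if n == 0:
--         return []
--     starts = [0] + [k for k in range(1, n)
--                     if matching[k] != (matching[k - 1][0] + 1, matching[k - 1][1] + 1)]
--     ends = starts[1:] + [n]
--     return [((matching[s][0], matching[e - 1][0]), (matching[s][1], matching[e - 1][1]))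
--             for s, e in zip(starts, ends)]
-- ===== Notes on version B (the rewrite author's own statement) =====
-- stated objective: alternative
-- what changed: replaces A's online accumulator (running span_start/span_end built while scanning) by an index/boundary algorithm: first compute the list of break indices with a comprehension, then zip starts with ends and read each span's endpoints off the list by index
import Mathlib
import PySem

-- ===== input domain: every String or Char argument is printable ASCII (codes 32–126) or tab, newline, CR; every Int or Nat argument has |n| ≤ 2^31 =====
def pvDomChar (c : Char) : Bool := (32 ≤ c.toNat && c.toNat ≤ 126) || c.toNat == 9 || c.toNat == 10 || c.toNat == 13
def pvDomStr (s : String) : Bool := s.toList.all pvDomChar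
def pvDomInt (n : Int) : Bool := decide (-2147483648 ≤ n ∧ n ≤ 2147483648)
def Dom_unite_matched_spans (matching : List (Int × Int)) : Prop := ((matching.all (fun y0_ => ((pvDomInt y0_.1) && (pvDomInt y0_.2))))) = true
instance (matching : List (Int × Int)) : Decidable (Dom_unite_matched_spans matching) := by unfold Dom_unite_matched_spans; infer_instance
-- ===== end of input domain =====

-- B replaces A's online accumulator by a boundary-index algorithm (compute break indices,
-- zip starts with ends, read span endpoints off the list by index); same O(n) cost, alternative structure.


-- ===== PORT A =====
-- state: (span_start, span_end, spans), exactly A's loop over matching[1:]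
def pvStepA (s : (Int × Int) × (Int × Int) × List ((Int × Int) × (Int × Int))) (p : Int × Int) :
    (Int × Int) × (Int × Int) × List ((Int × Int) × (Int × Int)) :=
  if p.1 = s.2.1.1 + 1 ∧ p.2 = s.2.1.2 + 1 then (s.1, p, s.2.2)
  else (p, p, s.2.2 ++ [((s.1.1, s.2.1.1), (s.1.2, s.2.1.2))])

def unite_matched_spans (matching : List (Int × Int)) : List ((Int × Int) × (Int × Int)) :=
  match matching with
  | [] => []
  | m0 :: rest =>
    let st := rest.foldl pvStepA (m0, m0, [])
    st.2.2 ++ [((st.1.1, st.2.1.1), (st.1.2, st.2.1.2))]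

-- ===== PORT B =====
-- matching[k] for an in-range nonnegative index (B only indexes inside the list)
def pvGetN (m : List (Int × Int)) (k : Nat) : Int × Int := m.getD k (0, 0)

-- the comprehension's condition: matching[k] != (matching[k-1][0]+1, matching[k-1][1]+1)
def pvBrk (m : List (Int × Int)) (k : Nat) : Bool :=
  !(pvGetN m k == ((pvGetN m (k - 1)).1 + 1, (pvGetN m (k - 1)).2 + 1))

-- starts = [0] + [k for k in range(1, n) if ...]   (range(1,n) = List.range' 1 (n-1))
def pvStarts (m : List (Int × Int)) : List Nat :=
  0 :: (List.range' 1 (m.length - 1)).filter (pvBrk m)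

def unite_matched_spans_alt (matching : List (Int × Int)) : List ((Int × Int) × (Int × Int)) :=
  if matching.length = 0 then []
  else
    let starts := pvStarts matching
    let ends := starts.drop 1 ++ [matching.length]
    (starts.zip ends).map (fun se =>
      (((pvGetN matching se.1).1, (pvGetN matching (se.2 - 1)).1),
       ((pvGetN matching se.1).2, (pvGetN matching (se.2 - 1)).2)))

-- ===== PRECONDITION & SPEC =====
def Spec_unite_matched_spans (matching : List (Int × Int)) (out : List ((Int × Int) × (Int × Int))) : Prop := out = unite_matched_spans_alt matching
instance (matching : List (Int × Int)) (out : List ((Int × Int) × (Int × Int))) : Decidable (Spec_unite_matched_spans matching out) := by unfold Spec_unite_matched_spans; infer_instance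

-- ===== CLAIM (what is proved, stated in full; the proofs are below) =====
def Claim_equal_unite_matched_spans : Prop := ∀ (matching : List (Int × Int)), Dom_unite_matched_spans matching → Spec_unite_matched_spans matching (unite_matched_spans matching)

-- ===== LEMMAS AND PROOFS =====

-- common recursive specification: replace the start of the first span
def pvRepl (s : Int × Int) : List ((Int × Int) × (Int × Int)) → List ((Int × Int) × (Int × Int))
  | [] => []
  | sp :: t => ((s.1, sp.1.2), (s.2, sp.2.2)) :: t

def pvSpec : List (Int × Int) → List ((Int × Int) × (Int × Int))
  | [] => []
  | [p] => [((p.1, p.1), (p.2, p.2))]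
  | p :: q :: rest =>
    if q.1 = p.1 + 1 ∧ q.2 = p.2 + 1 then pvRepl p (pvSpec (q :: rest))
    else ((p.1, p.1), (p.2, p.2)) :: pvSpec (q :: rest)

-- ---- A = pvSpec ----

def pvAout (s e : Int × Int) (rest : List (Int × Int)) : List ((Int × Int) × (Int × Int)) :=
  let st := rest.foldl pvStepA (s, e, [])
  st.2.2 ++ [((st.1.1, st.2.1.1), (st.1.2, st.2.1.2))]

lemma pvA_spans_prefix (rest : List (Int × Int)) (s e : Int × Int)
    (spans : List ((Int × Int) × (Int × Int))) :
    rest.foldl pvStepA (s, e, spans) =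
      ((rest.foldl pvStepA (s, e, [])).1, (rest.foldl pvStepA (s, e, [])).2.1,
        spans ++ (rest.foldl pvStepA (s, e, [])).2.2) := by
  induction rest generalizing s e spans with
  | nil => simp
  | cons p rest ih =>
    simp only [List.foldl_cons, pvStepA]
    split_ifs with h
    · exact ih s p spans
    · simp only [List.nil_append]
      rw [ih p p (spans ++ _), ih p p [((s.1, e.1), (s.2, e.2))]]
      simp

lemma pvAout_nil (s e : Int × Int) : pvAout s e [] = [((s.1, e.1), (s.2, e.2))] := by
  simp [pvAout]

lemma pvAout_cons (s e p : Int × Int) (rest : List (Int × Int)) :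
    pvAout s e (p :: rest) =
      if p.1 = e.1 + 1 ∧ p.2 = e.2 + 1 then pvAout s p rest
      else ((s.1, e.1), (s.2, e.2)) :: pvAout p p rest := by
  simp only [pvAout, List.foldl_cons, pvStepA]
  split_ifs with h
  · rfl
  · simp only [List.nil_append]
    rw [pvA_spans_prefix rest p p [((s.1, e.1), (s.2, e.2))]]
    simp

lemma pvAout_repl (rest : List (Int × Int)) (s e : Int × Int) :
    pvAout s e rest = pvRepl s (pvAout e e rest) := by
  induction rest generalizing s e with
  | nil => simp [pvAout_nil, pvRepl]
  | cons p rest ih =>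
    rw [pvAout_cons, pvAout_cons]
    split_ifs with h
    · rw [ih s p, ih e p]
      cases h' : pvAout p p rest with
      | nil => simp [pvRepl]
      | cons a t => simp [pvRepl]
    · simp [pvRepl]

lemma pvAout_eq_spec (rest : List (Int × Int)) (p : Int × Int) :
    pvAout p p rest = pvSpec (p :: rest) := by
  induction rest generalizing p with
  | nil => simp [pvAout_nil, pvSpec]
  | cons q rest ih =>
    rw [pvAout_cons]
    simp only [pvSpec]
    split_ifs with h
    · rw [pvAout_repl, ih q]
    · rw [ih q]

lemma pvA_eq_spec (m : List (Int × Int)) : unite_matched_spans m = pvSpec m := by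
  cases m with
  | nil => rfl
  | cons p rest => exact pvAout_eq_spec rest p

-- ---- B = pvSpec ----

lemma pvGetN_cons_succ (p : Int × Int) (rest : List (Int × Int)) (k : Nat) :
    pvGetN (p :: rest) (k + 1) = pvGetN rest k := rfl

lemma pvBrk_shift (p : Int × Int) (rest : List (Int × Int)) (k : Nat) (hk : 1 ≤ k) :
    pvBrk (p :: rest) (k + 1) = pvBrk rest k := by
  obtain ⟨k, rfl⟩ := Nat.exists_eq_add_of_le hk
  simp [pvBrk, pvGetN_cons_succ, Nat.add_comm 1 k]

lemma pvStarts_cons (p q : Int × Int) (rest : List (Int × Int)) :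
    pvStarts (p :: q :: rest) =
      if q.1 = p.1 + 1 ∧ q.2 = p.2 + 1 then
        0 :: ((pvStarts (q :: rest)).drop 1).map (· + 1)
      else 0 :: (pvStarts (q :: rest)).map (· + 1) := by
  have hlen : (p :: q :: rest).length - 1 = (q :: rest).length := by simp
  have hrange : List.range' 1 ((q :: rest).length) = 1 :: List.range' 2 ((q :: rest).length - 1) := by
    simp [List.range'_succ]
  have hmap : List.range' 2 ((q :: rest).length - 1) =
      (List.range' 1 ((q :: rest).length - 1)).map (· + 1) := by
    have h := List.map_add_range' (a := 1) 1 ((q :: rest).length - 1) 1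
    simpa [Nat.add_comm] using h.symm
  have hfilter : (List.range' 2 ((q :: rest).length - 1)).filter (pvBrk (p :: q :: rest)) =
      ((List.range' 1 ((q :: rest).length - 1)).filter (pvBrk (q :: rest))).map (· + 1) := by
    rw [hmap, List.filter_map]
    congr 1
    apply List.filter_congr
    intro k hk
    have hk1 : 1 ≤ k := (List.mem_range'_1.mp hk).1
    simpa using pvBrk_shift p (q :: rest) k hk1
  have hb : pvBrk (p :: q :: rest) 1 = !(q == (p.1 + 1, p.2 + 1)) := rfl
  simp only [pvStarts, hlen, hrange, List.filter_cons, hb, hfilter]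
  by_cases h : q.1 = p.1 + 1 ∧ q.2 = p.2 + 1
  · have hq : (q == (p.1 + 1, p.2 + 1)) = true := by
      rw [beq_iff_eq]; cases q; simp_all
    simp [h, hq]
  · have hq : (q == (p.1 + 1, p.2 + 1)) = false := by
      rw [beq_eq_false_iff_ne]; intro hq; apply h; rw [hq]; exact ⟨rfl, rfl⟩
    simp [h, hq]

-- subsets: every element of pvStarts's tail is ≥ 1 and < length
lemma pvStarts_tail_mem (m : List (Int × Int)) (k : Nat)
    (hk : k ∈ (pvStarts m).drop 1) : 1 ≤ k ∧ k < m.length := by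
  simp only [pvStarts, List.drop_succ_cons, List.drop_zero] at hk
  have := List.mem_range'_1.mp (List.mem_of_mem_filter hk)
  omega

-- B's output written as a function of starts
def pvBf (m : List (Int × Int)) (se : Nat × Nat) : ((Int × Int) × (Int × Int)) :=
  (((pvGetN m se.1).1, (pvGetN m (se.2 - 1)).1),
   ((pvGetN m se.1).2, (pvGetN m (se.2 - 1)).2))

lemma pvBf_shift (p : Int × Int) (rest : List (Int × Int)) (s e : Nat) (he : 1 ≤ e) :
    pvBf (p :: rest) (s + 1, e + 1) = pvBf rest (s, e) := by
  obtain ⟨e, rfl⟩ := Nat.exists_eq_add_of_le he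
  simp [pvBf, pvGetN_cons_succ, Nat.add_comm 1 e]

-- the shifted tail-zip lemma
lemma pvB_zip_shift (p : Int × Int) (rest : List (Int × Int)) (S : List Nat)
    (hS : ∀ e ∈ S.drop 1 ++ [rest.length], 1 ≤ e) :
    ((S.map (· + 1)).zip ((S.drop 1).map (· + 1) ++ [rest.length + 1])).map (pvBf (p :: rest)) =
      (S.zip (S.drop 1 ++ [rest.length])).map (pvBf rest) := by
  have h1 : (S.drop 1).map (· + 1) ++ [rest.length + 1] =
      (S.drop 1 ++ [rest.length]).map (· + 1) := by simp
  rw [h1, List.zip_map, List.map_map]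
  apply List.map_congr_left
  intro a ha
  have hmem := List.of_mem_zip ha
  exact pvBf_shift p rest a.1 a.2 (hS a.2 hmem.2)

def pvBout (m : List (Int × Int)) : List ((Int × Int) × (Int × Int)) :=
  ((pvStarts m).zip ((pvStarts m).drop 1 ++ [m.length])).map (pvBf m)

lemma pvAlt_eq_pvBout (p : Int × Int) (rest : List (Int × Int)) :
    unite_matched_spans_alt (p :: rest) = pvBout (p :: rest) := by
  simp [unite_matched_spans_alt, pvBout, pvBf]

lemma pvB_eq_spec_cons (rest : List (Int × Int)) (p : Int × Int) :
    pvBout (p :: rest) = pvSpec (p :: rest) := by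
  induction rest generalizing p with
  | nil =>
    simp [pvBout, pvStarts, pvSpec, pvBf, pvGetN]
  | cons q rest' ih =>
    have hS : pvStarts (q :: rest') = 0 :: (pvStarts (q :: rest')).drop 1 := by
      simp [pvStarts]
    have hge : ∀ e ∈ (pvStarts (q :: rest')).drop 1 ++ [(q :: rest').length], 1 ≤ e := by
      intro e he
      rcases List.mem_append.mp he with h | h
      · exact (pvStarts_tail_mem _ _ h).1
      · simp at h; simp [h]
    have hlen : (p :: q :: rest').length = (q :: rest').length + 1 := by simp
    have hsc := pvStarts_cons p q rest'
    by_cases h : q.1 = p.1 + 1 ∧ q.2 = p.2 + 1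
    · -- continuing: first span of the tail gets its start replaced by p
      rw [if_pos h] at hsc
      simp only [pvSpec, if_pos h, ← ih q]
      cases hT : (pvStarts (q :: rest')).drop 1 with
      | nil =>
        have hgetn : pvGetN (p :: q :: rest') ((q :: rest').length) =
            pvGetN (q :: rest') ((q :: rest').length - 1) := by
          have h1 : (q :: rest').length = ((q :: rest').length - 1) + 1 := by simp
          rw [h1, pvGetN_cons_succ]
          simp
        rw [pvBout, pvBout, hsc, hT, hS, hT, hlen]
        simp only [List.map_nil, List.drop_succ_cons, List.drop_zero, List.nil_append,
          List.zip_cons_cons, List.zip_nil_right, List.map_cons, List.map_nil, pvRepl,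
          pvBf, Nat.add_sub_cancel, hgetn]
        rfl
      | cons t T' =>
        have ht1 : 1 ≤ t :=
          (pvStarts_tail_mem (q :: rest') t (by rw [hT]; exact List.mem_cons_self ..)).1
        have hg : pvGetN (p :: q :: rest') t = pvGetN (q :: rest') (t - 1) := by
          have h1 : t = (t - 1) + 1 := by omega
          rw [h1, pvGetN_cons_succ]
          simp
        have hshift := pvB_zip_shift p (q :: rest') (t :: T')
          (by intro e he
              simp only [List.drop_succ_cons, List.drop_zero] at he
              apply hge
              rw [hT]
              rcases List.mem_append.mp he with h1 | h1
              · exact List.mem_append.mpr (Or.inl (List.mem_cons_of_mem _ h1))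
              · exact List.mem_append.mpr (Or.inr h1))
        simp only [List.drop_succ_cons, List.drop_zero, List.map_cons] at hshift
        rw [pvBout, pvBout, hsc, hT, hS, hT, hlen]
        simp only [List.map_cons, List.drop_succ_cons, List.drop_zero, List.cons_append,
          List.zip_cons_cons, List.map_cons, pvRepl]
        rw [List.cons_eq_cons]
        constructor
        · simp only [pvBf, Nat.add_sub_cancel, hg]
          rfl
        · exact hshift
    · -- break at p/q: emit the singleton span for p, shift the rest
      rw [if_neg h] at hsc
      simp only [pvSpec, if_neg h, ← ih q]
      have hshift := pvB_zip_shift p (q :: rest') (pvStarts (q :: rest')) hge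
      have hsh2 : ((pvStarts (q :: rest')).zip
            ((pvStarts (q :: rest')).drop 1 ++ [(q :: rest').length])).map (pvBf (q :: rest')) =
          pvBout (q :: rest') := by rw [pvBout]
      rw [hsh2] at hshift
      rw [pvBout, hsc, hlen]
      simp only [List.drop_succ_cons, List.drop_zero]
      conv_lhs => rw [hS]
      simp only [List.map_cons, List.cons_append, List.zip_cons_cons, Nat.zero_add]
      rw [List.cons_eq_cons]
      constructor
      · simp [pvBf, pvGetN]
      · rw [← hshift]
        conv_rhs => rw [hS]
        simp [List.map_cons]

lemma pvB_eq_spec (m : List (Int × Int)) : unite_matched_spans_alt m = pvSpec m := by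
  cases m with
  | nil => rfl
  | cons p rest => rw [pvAlt_eq_pvBout, pvB_eq_spec_cons]

-- ===== VERDICT (by name: the statement is the Claim_ definition above) =====
theorem unite_matched_spans_spec : Claim_equal_unite_matched_spans := by
  intro matching _
  unfold Spec_unite_matched_spans
  rw [pvA_eq_spec, pvB_eq_spec]
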